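-- pv_equiv track=rewrite | github.com/ChloeLidec/ChloeLidecProjects | Dev Python/tp10_matrices/tp10.py | en_voie_disparition
-- ===== SOURCE A (Python) =====
-- def extinction_immediate(ecosysteme, animal):
--     """
--     renvoie True si animal s'éteint immédiatement dans l'écosystème faute
--     de nourriture
--     """
--     if ecosysteme[animal] not in ecosysteme and ecosysteme[animal] is not None :
--         return True
--     return False
--
-- def en_voie_disparition(ecosysteme, animal):
--     """
--     renvoie True si animal s'éteint est voué à disparaitre à long terme
--     """
--     etu = animal
--     disp = extinction_immediate(ecosysteme, animal)
--     cpt = 0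
--     while not disp and cpt < len(ecosysteme):
--         if ecosysteme[etu] is None:
--             return False
--         elif extinction_immediate(ecosysteme, etu):
--             disp = True
--         etu = ecosysteme[etu]
--         cpt += 1
--     return disp
-- ===== SOURCE B (Python) =====
-- def en_voie_disparition(ecosysteme, animal):
--     """Bottom-up fixpoint: iteratively compute the set of ALL doomed animals
--     (round k = doomed within k steps), then answer by membership."""
--     if ecosysteme[animal] is None:   # unknown animal raises KeyError, as in A
--         return False                 # animal needs no food: it survives
--     doomed = set()
--     for _ in range(len(ecosysteme)):
--         doomed = {x for x, food in ecosysteme.items()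
--                   if food is not None and (food not in ecosysteme or food in doomed)}
--     return animal in doomed
-- ===== Notes on version B (the rewrite author's own statement) =====
-- stated objective: alternative
-- what changed: B abandons A's forward chain walk from the queried animal (step counter, disp flag, extinction_immediate pre-check) for a bottom-up fixpoint: it iterates a set comprehension len(ecosysteme) times to compute the set of ALL doomed animals (round k = doomed within k steps) and answers by membership.
import Mathlib
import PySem

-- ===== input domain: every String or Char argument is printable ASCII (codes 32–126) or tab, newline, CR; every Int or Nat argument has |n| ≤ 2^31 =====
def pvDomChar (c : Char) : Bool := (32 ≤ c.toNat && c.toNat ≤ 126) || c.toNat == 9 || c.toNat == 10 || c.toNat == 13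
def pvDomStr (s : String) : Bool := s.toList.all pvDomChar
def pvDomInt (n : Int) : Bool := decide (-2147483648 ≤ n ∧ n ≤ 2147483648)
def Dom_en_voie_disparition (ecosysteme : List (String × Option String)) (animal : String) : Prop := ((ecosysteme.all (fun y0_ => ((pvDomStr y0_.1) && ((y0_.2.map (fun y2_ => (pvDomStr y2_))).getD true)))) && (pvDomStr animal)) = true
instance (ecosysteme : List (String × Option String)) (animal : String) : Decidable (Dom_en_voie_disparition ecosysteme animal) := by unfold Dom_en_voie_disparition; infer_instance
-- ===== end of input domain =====

-- B replaces A's forward chain walk by a bottom-up fixpoint: it iteratively computes the set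
-- of ALL doomed animals (len(ecosysteme) rounds of a set comprehension) and answers by membership.

-- ===== PORT A =====
-- extinction_immediate: food = eco[x]; True iff food is not a key and food is not None.
def pyExtinctionImmediate (d : PySem.Dict String (Option String)) (x : String) : Bool :=
  match d.get? x with
  | none => false            -- Python raises KeyError here (never reached under Pre_)
  | some none => false       -- 'None not in eco' holds but 'is not None' fails → False
  | some (some f) => !(d.contains f)

-- the while loop of A: fuel = len(ecosysteme) - cpt; returns disp when fuel runs out
def evdLoopA (d : PySem.Dict String (Option String)) (etu : String) (disp : Bool) (fuel : Nat) : Bool :=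
  match fuel with
  | 0 => disp
  | Nat.succ fuel' =>
    if disp then disp
    else
      match d.get? etu with
      | none => false        -- Python raises KeyError here (never reached under Pre_)
      | some none => false
      | some (some f) => evdLoopA d f (pyExtinctionImmediate d etu) fuel'

def en_voie_disparition (ecosysteme : List (String × Option String)) (animal : String) : Bool :=
  let d := PySem.Dict.ofList ecosysteme
  match d.get? animal with
  | none => false            -- Python raises KeyError here (excluded by Pre_)
  | some _ => evdLoopA d animal (pyExtinctionImmediate d animal) d.size

-- ===== PORT B =====
-- one round: the set comprehension over ecosysteme.items()
def evdStep (d : PySem.Dict String (Option String)) (doomed : PySem.Set String) : PySem.Set String :=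
  PySem.Set.ofList ((d.items.filter (fun p =>
    match p.2 with
    | some f => !d.contains f || PySem.Set.contains doomed f
    | none => false)).map Prod.fst)

-- the 'for _ in range(len(ecosysteme))' loop, counted by its number of rounds
def evdIter (d : PySem.Dict String (Option String)) : Nat → PySem.Set String
  | 0 => PySem.Set.empty
  | Nat.succ k => evdStep d (evdIter d k)

def en_voie_disparition_alt (ecosysteme : List (String × Option String)) (animal : String) : Bool :=
  let d := PySem.Dict.ofList ecosysteme
  match d.get? animal with
  | none => false            -- Python raises KeyError here (excluded by Pre_)
  | some none => false       -- animal needs no food: it survives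
  | some (some _) => PySem.Set.contains (evdIter d d.size) animal

-- ===== PRECONDITION & SPEC =====
-- Pre_: animal is a key of the ecosystem; otherwise Python A raises KeyError on ecosysteme[animal].
def Pre_en_voie_disparition (ecosysteme : List (String × Option String)) (animal : String) : Prop :=
  animal ∈ ecosysteme.map Prod.fst
instance (ecosysteme : List (String × Option String)) (animal : String) : Decidable (Pre_en_voie_disparition ecosysteme animal) := by unfold Pre_en_voie_disparition; infer_instance

def pvWitness_en_voie_disparition : (List (String × Option String)) × String :=
  ([("a", some "b"), ("b", none)], "a")

def Spec_en_voie_disparition (ecosysteme : List (String × Option String)) (animal : String) (out : Bool) : Prop := out = en_voie_disparition_alt ecosysteme animal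
instance (ecosysteme : List (String × Option String)) (animal : String) (out : Bool) : Decidable (Spec_en_voie_disparition ecosysteme animal out) := by unfold Spec_en_voie_disparition; infer_instance

-- ===== CLAIM =====
def Claim_equal_en_voie_disparition : Prop := ∀ (ecosysteme : List (String × Option String)) (animal : String), Dom_en_voie_disparition ecosysteme animal → Pre_en_voie_disparition ecosysteme animal → Spec_en_voie_disparition ecosysteme animal (en_voie_disparition ecosysteme animal)

-- ===== LEMMAS AND PROOFS =====

-- 'doomed within k steps': the common characterisation both programs compute
def ddp (d : PySem.Dict String (Option String)) : Nat → String → Bool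
  | 0, _ => false
  | Nat.succ k, x =>
    match d.get? x with
    | some (some f) => !d.contains f || ddp d k f
    | _ => false

-- A's loop with disp already true returns true
theorem evdLoopA_true (d : PySem.Dict String (Option String)) (etu : String) (fuel : Nat) :
    evdLoopA d etu true fuel = true := by
  cases fuel <;> simp [evdLoopA]

-- A's loop started with disp = false computes 'doomed within fuel steps'
theorem evdLoopA_eq_ddp (d : PySem.Dict String (Option String)) :
    ∀ (fuel : Nat) (etu : String), evdLoopA d etu false fuel = ddp d fuel etu := by
  intro fuel
  induction fuel with
  | zero => intro etu; simp [evdLoopA, ddp]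
  | succ k ih =>
    intro etu
    simp only [evdLoopA, ddp, Bool.false_eq_true, if_false]
    cases hget : d.get? etu with
    | none => rfl
    | some food =>
      cases food with
      | none => rfl
      | some f =>
        simp only [pyExtinctionImmediate, hget]
        cases hc : d.contains f with
        | true => simp [ih f]
        | false => simp [evdLoopA_true]

-- B's round-k set contains exactly the animals doomed within k steps
theorem evdIter_eq_ddp (d : PySem.Dict String (Option String)) (hnd : d.keys.Nodup) :
    ∀ (k : Nat) (x : String), PySem.Set.contains (evdIter d k) x = ddp d k x := by
  intro k
  induction k with
  | zero => intro x; simp [evdIter, ddp, PySem.Set.empty]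
  | succ k ih =>
    intro x
    rw [Bool.eq_iff_iff, PySem.Set.contains_iff]
    simp only [evdIter, evdStep, PySem.Set.mem_ofList, List.mem_map, List.mem_filter]
    constructor
    · rintro ⟨⟨y, v⟩, ⟨hmem, hp⟩, rfl⟩
      have hg : d.get? y = some v := PySem.Dict.get?_of_mem_items _ hmem hnd
      cases v with
      | none => simp at hp
      | some f =>
        simp only [ddp, hg]
        rw [← ih f]
        exact hp
    · intro h
      cases hget : d.get? x with
      | none => simp [ddp, hget] at h
      | some v =>
        cases v with
        | none => simp [ddp, hget] at h
        | some f =>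
          refine ⟨(x, some f), ⟨PySem.Dict.mem_items_of_get?_eq_some _ hget, ?_⟩, rfl⟩
          simp only [ddp, hget] at h
          rw [← ih f] at h
          exact h

-- membership in the keys of Dict.ofList is membership among the pairs' first components
theorem mem_keys_ofList_iff (eco : List (String × Option String)) (a : String) :
    a ∈ (PySem.Dict.ofList eco).keys ↔ a ∈ eco.map Prod.fst := by
  show a ∈ (List.foldl (fun acc p => acc.insert p.1 p.2) PySem.Dict.empty eco).keys ↔ _
  rw [PySem.Dict.keys_foldl_insert_key eco Prod.fst (fun _ p => p.2) PySem.Dict.empty]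
  simp [PySem.Set.mem_update, PySem.Dict.keys_empty]

-- ===== VERDICT =====
theorem en_voie_disparition_spec : Claim_equal_en_voie_disparition := by
  intro eco animal _ hpre
  unfold Spec_en_voie_disparition
  unfold Pre_en_voie_disparition at hpre
  have hknd : (PySem.Dict.ofList eco).keys.Nodup := PySem.Dict.nodup_keys_ofList eco
  have hkey : animal ∈ (PySem.Dict.ofList eco).keys := (mem_keys_ofList_iff eco animal).mpr hpre
  have hcont : (PySem.Dict.ofList eco).contains animal = true :=
    (PySem.Dict.contains_iff_mem_keys _ _).mpr hkey
  have hgs : ((PySem.Dict.ofList eco).get? animal).isSome := by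
    rw [← PySem.Dict.contains_eq_isSome_get?]; exact hcont
  obtain ⟨food, hget⟩ := Option.isSome_iff_exists.mp hgs
  have hsz : ∃ m, (PySem.Dict.ofList eco).size = m + 1 := by
    have : (PySem.Dict.ofList eco).keys ≠ [] := List.ne_nil_of_mem hkey
    have hlen : (PySem.Dict.ofList eco).keys.length = (PySem.Dict.ofList eco).size := by
      simp [PySem.Dict.keys, PySem.Dict.size]
    rcases Nat.exists_eq_add_of_lt (List.length_pos_of_ne_nil this) with ⟨m, hm⟩
    exact ⟨m, by omega⟩
  obtain ⟨m, hm⟩ := hsz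
  unfold en_voie_disparition en_voie_disparition_alt
  simp only [hget]
  cases food with
  | none =>
    have hpe : pyExtinctionImmediate (PySem.Dict.ofList eco) animal = false := by
      simp [pyExtinctionImmediate, hget]
    rw [hpe, hm]
    simp [evdLoopA, hget]
  | some f =>
    rw [evdIter_eq_ddp _ hknd]
    cases hpe : pyExtinctionImmediate (PySem.Dict.ofList eco) animal with
    | false => rw [evdLoopA_eq_ddp]
    | true =>
      rw [evdLoopA_true]
      have hcf : (PySem.Dict.ofList eco).contains f = false := by
        simp [pyExtinctionImmediate, hget] at hpe
        simpa using hpe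
      rw [hm]
      simp [ddp, hget, hcf]
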